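-- pv_equiv track=rewrite | github.com/AmazinDoge/DogeOpsPy | linux/l4_port.py | aggregate_ports
-- ===== SOURCE A (Python) =====
-- def aggregate_ports(ports):
--     """
--     Take a list of port numbers and return a list of strings where consecutive
--     runs are collapsed to 'start-end' and singletons stay as 'n'.
--     Example: [3001,3004,3009,3010,3011,3995,3997,3998,3999]
--              -> ['3001','3004','3009-3011','3995','3997','3998-3999']
--     """
--     if not ports:
--         return []
--
--     ports = sorted(set(int(p) for p in ports))
--     result = []
--
--     start = prev = ports[0]
--     for p in ports[1:]:
--         if p == prev + 1:
--             # still in a consecutive run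
--             prev = p
--             continue
--
--         # run ended at prev; emit it
--         if start == prev:
--             result.append(str(start))
--         else:
--             result.append(f"{start}-{prev}")
--
--         # start a new run
--         start = prev = p
--
--     # emit the final run
--     if start == prev:
--         result.append(str(start))
--     else:
--         result.append(f"{start}-{prev}")
--
--     return result
-- ===== SOURCE B (Python) =====
-- from itertools import groupby
--
--
-- def aggregate_ports(ports):
--     if not ports:
--         return []
--     ps = sorted(set(int(p) for p in ports))
--     out = []
--     # value minus index is constant exactly within a consecutive run
--     for _, grp in groupby(enumerate(ps), key=lambda iv: iv[1] - iv[0]):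
--         vs = [v for _, v in grp]
--         out.append(str(vs[0]) if vs[0] == vs[-1] else f"{vs[0]}-{vs[-1]}")
--     return out
-- ===== Notes on version B (the rewrite author's own statement) =====
-- stated objective: idiomatic
-- what changed: Replaces A's explicit start/prev state machine with itertools.groupby over enumerate(sorted(set(ports))) keyed by value-minus-index (constant within a consecutive run), iterating group by group.
import Mathlib
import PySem

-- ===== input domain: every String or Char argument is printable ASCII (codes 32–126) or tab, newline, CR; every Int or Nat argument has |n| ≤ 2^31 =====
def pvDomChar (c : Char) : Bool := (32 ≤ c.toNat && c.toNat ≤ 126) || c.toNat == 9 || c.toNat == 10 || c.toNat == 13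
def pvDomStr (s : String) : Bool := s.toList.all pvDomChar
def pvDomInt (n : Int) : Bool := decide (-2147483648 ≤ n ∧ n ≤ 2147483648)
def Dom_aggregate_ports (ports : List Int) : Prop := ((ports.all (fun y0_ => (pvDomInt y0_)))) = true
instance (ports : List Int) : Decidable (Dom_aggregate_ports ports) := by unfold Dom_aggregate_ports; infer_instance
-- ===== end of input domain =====

-- B rewrites A's explicit start/prev state machine as itertools.groupby over enumerate keyed by value-minus-index (idiomatic decomposition, same cost).

-- ===== PORT A =====
-- emit of one run: str(start) or f"{start}-{prev}"
def pvEmit (start prev : Int) : String :=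
  if start = prev then PySem.Int.toStr start
  else PySem.Int.toStr start ++ "-" ++ PySem.Int.toStr prev

def aggregate_ports (ports : List Int) : List String :=
  match ports with
  | [] => []
  | _ :: _ =>
    -- ports = sorted(set(int(p) for p in ports)); int(p) is the identity on ints
    match PySem.List.sorted (PySem.Set.ofList ports) (fun x => x) false with
    | [] => []  -- unreachable: sorted(set(..)) of a nonempty list is nonempty (ports[0] never raises here)
    | s0 :: rest =>
      let st := rest.foldl (fun (st : Int × Int × List String) p =>
        let (start, prev, result) := st
        if p = prev + 1 then (start, p, result)
        else (p, p, result ++ [pvEmit start prev])) (s0, s0, [])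
      st.2.2 ++ [pvEmit st.1 st.2.1]

-- ===== PORT B =====
-- transliteration of itertools.groupby(enumerate(ps), key=lambda iv: iv[1]-iv[0]):
-- pvGroupRun collects the rest of the current group (key still = k), pvGroups splits into the maximal groups.
def pvGroupRun (k : Int) : List (Int × Int) → List (Int × Int) × List (Int × Int)
  | [] => ([], [])
  | (i, v) :: rest =>
    if v - i = k then
      let (g, rem) := pvGroupRun k rest
      ((i, v) :: g, rem)
    else ([], (i, v) :: rest)

theorem pvGroupRun_len (k : Int) (l : List (Int × Int)) : (pvGroupRun k l).2.length ≤ l.length := by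
  induction l with
  | nil => simp [pvGroupRun]
  | cons x rest ih =>
    obtain ⟨i, v⟩ := x
    simp only [pvGroupRun]
    split
    · simpa using Nat.le_succ_of_le ih
    · simp

def pvGroups : List (Int × Int) → List (List (Int × Int))
  | [] => []
  | (i, v) :: rest =>
    ((i, v) :: (pvGroupRun (v - i) rest).1) :: pvGroups (pvGroupRun (v - i) rest).2
termination_by l => l.length
decreasing_by
  simpa using Nat.lt_succ_of_le (pvGroupRun_len (v - i) rest)

-- vs = [v for _, v in grp]; then vs[0] / vs[-1] (groups are nonempty, so the .getD 0 defaults are never used)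
def pvFmtGroup (g : List (Int × Int)) : String :=
  let vs := g.map Prod.snd
  let f := vs.head?.getD 0
  let l := vs.getLast?.getD 0
  if f = l then PySem.Int.toStr f
  else PySem.Int.toStr f ++ "-" ++ PySem.Int.toStr l

def aggregate_ports_alt (ports : List Int) : List String :=
  match ports with
  | [] => []
  | _ :: _ =>
    let ps := PySem.List.sorted (PySem.Set.ofList ports) (fun x => x) false
    (pvGroups (PySem.List.enumerate ps)).map pvFmtGroup

-- ===== PRECONDITION & SPEC =====
def Spec_aggregate_ports (ports : List Int) (out : List String) : Prop := out = aggregate_ports_alt ports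
instance (ports : List Int) (out : List String) : Decidable (Spec_aggregate_ports ports out) := by unfold Spec_aggregate_ports; infer_instance

-- ===== CLAIM (what is proved, stated in full; the proofs are below) =====
def Claim_equal_aggregate_ports : Prop := ∀ (ports : List Int), Dom_aggregate_ports ports → Spec_aggregate_ports ports (aggregate_ports ports)

-- ===== LEMMAS AND PROOFS =====

-- common model of the run-collapsing loop, structural in the tail
def pvModel (start prev : Int) : List Int → List String
  | [] => [pvEmit start prev]
  | p :: rest =>
    if p = prev + 1 then pvModel start p rest
    else pvEmit start prev :: pvModel p p rest

-- A-side fold with explicit accumulator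
def pvAFold (start prev : Int) (acc : List String) : List Int → List String
  | [] => acc ++ [pvEmit start prev]
  | p :: rest =>
    if p = prev + 1 then pvAFold start p acc rest
    else pvAFold p p (acc ++ [pvEmit start prev]) rest

theorem pvAFold_eq_foldl (l : List Int) (start prev : Int) (acc : List String) :
    pvAFold start prev acc l =
      (let st := l.foldl (fun (st : Int × Int × List String) p =>
        let (s, pr, result) := st
        if p = pr + 1 then (s, p, result)
        else (p, p, result ++ [pvEmit s pr])) (start, prev, acc)
       st.2.2 ++ [pvEmit st.1 st.2.1]) := by
  induction l generalizing start prev acc with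
  | nil => simp [pvAFold]
  | cons p rest ih =>
    simp only [pvAFold, List.foldl_cons]
    split_ifs with h <;> simp [h, ih]

theorem pvAFold_acc (l : List Int) (start prev : Int) (acc : List String) :
    pvAFold start prev acc l = acc ++ pvAFold start prev [] l := by
  induction l generalizing start prev acc with
  | nil => simp [pvAFold]
  | cons p rest ih =>
    simp only [pvAFold]
    split_ifs with h
    · exact ih start p acc
    · rw [ih p p (acc ++ [pvEmit start prev]), ih p p ([] ++ [pvEmit start prev])]
      simp

theorem pvAFold_eq_model (l : List Int) (start prev : Int) :
    pvAFold start prev [] l = pvModel start prev l := by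
  induction l generalizing start prev with
  | nil => simp [pvAFold, pvModel]
  | cons p rest ih =>
    simp only [pvAFold, pvModel]
    split_ifs with h
    · exact ih start p
    · rw [pvAFold_acc]
      simp [ih]

-- the run splitter pvModel follows, on the plain list side
def pvTakeRun : Int → List Int → List Int × List Int
  | _, [] => ([], [])
  | prev, p :: rest =>
    if p = prev + 1 then
      let (r, rem) := pvTakeRun p rest
      (p :: r, rem)
    else ([], p :: rest)

theorem pvTakeRun_len (prev : Int) (l : List Int) : (pvTakeRun prev l).2.length ≤ l.length := by
  induction l generalizing prev with
  | nil => simp [pvTakeRun]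
  | cons p rest ih =>
    simp only [pvTakeRun]
    split
    · simpa using Nat.le_succ_of_le (ih p)
    · simp

def pvModelRest : List Int → List String
  | [] => []
  | q :: t => pvModel q q t

theorem pvModel_run (l : List Int) (start prev : Int) :
    pvModel start prev l =
      pvEmit start ((pvTakeRun prev l).1.getLastD prev) :: pvModelRest (pvTakeRun prev l).2 := by
  induction l generalizing start prev with
  | nil => simp [pvModel, pvTakeRun, pvModelRest]
  | cons p rest ih =>
    simp only [pvModel, pvTakeRun]
    split_ifs with h
    · rw [ih start p]
      simp [List.getLast?_cons, List.getLastD_eq_getLast?]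
    · simp [pvModelRest]

theorem pvGroupRun_enum (l : List Int) (i prev : Int) :
    pvGroupRun (prev - i) (PySem.List.enumerate l (i + 1)) =
      (PySem.List.enumerate (pvTakeRun prev l).1 (i + 1),
       PySem.List.enumerate (pvTakeRun prev l).2 (i + 1 + (pvTakeRun prev l).1.length)) := by
  induction l generalizing i prev with
  | nil => simp [pvTakeRun, pvGroupRun, PySem.List.enumerate_nil]
  | cons p rest ih =>
    rw [PySem.List.enumerate_cons]
    simp only [pvGroupRun, pvTakeRun]
    by_cases h : p = prev + 1
    · have hk : p - (i + 1) = prev - i := by omega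
      have hih := ih (i + 1) p
      rw [hk] at hih
      rw [if_pos hk, if_pos h, hih]
      refine congrArg₂ Prod.mk ?_ ?_
      · rw [PySem.List.enumerate_cons]
      · simp only [List.length_cons]
        congr 1
        push_cast
        ring
    · rw [if_neg (by omega : ¬ p - (i + 1) = prev - i), if_neg h]
      simp [PySem.List.enumerate_cons]

theorem pvGroups_eq_model (n : Nat) (l : List Int) (hl : l.length ≤ n) (i p : Int) :
    (pvGroups (PySem.List.enumerate (p :: l) i)).map pvFmtGroup = pvModel p p l := by
  induction n generalizing l i p with
  | zero =>
    have : l = [] := by cases l <;> simp_all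
    subst this
    simp [PySem.List.enumerate_cons, PySem.List.enumerate_nil, pvGroups, pvGroupRun,
      pvFmtGroup, pvModel, pvEmit]
  | succ n ih =>
    rw [PySem.List.enumerate_cons]
    simp only [pvGroups]
    have hge := pvGroupRun_enum l i p
    rw [hge]
    have hfmt : pvFmtGroup ((i, p) :: PySem.List.enumerate (pvTakeRun p l).1 (i + 1)) =
        pvEmit p ((pvTakeRun p l).1.getLastD p) := by
      simp only [pvFmtGroup, pvEmit, List.map_cons, PySem.List.map_snd_enumerate]
      have h1 : ((p :: (pvTakeRun p l).1).head?).getD 0 = p := by simp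
      have h2 : ((p :: (pvTakeRun p l).1).getLast?).getD 0 = (pvTakeRun p l).1.getLastD p := by
        rw [List.getLast?_cons, List.getLastD_eq_getLast?]
        cases (pvTakeRun p l).1.getLast? <;> simp
      rw [h1, h2]
    rw [List.map_cons, hfmt, pvModel_run]
    congr 1
    cases hrem : (pvTakeRun p l).2 with
    | nil => simp [PySem.List.enumerate_nil, pvGroups, pvModelRest]
    | cons q t =>
      have hlen : t.length ≤ n := by
        have := pvTakeRun_len p l
        rw [hrem] at this
        simp at this
        omega
      rw [pvModelRest, ← ih t hlen (i + 1 + (pvTakeRun p l).1.length) q]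

-- ===== VERDICT (by name: the statement is the Claim_ definition above) =====
theorem aggregate_ports_spec : Claim_equal_aggregate_ports := by
  intro ports _
  show aggregate_ports ports = aggregate_ports_alt ports
  cases ports with
  | nil => rfl
  | cons x xs =>
    simp only [aggregate_ports, aggregate_ports_alt]
    cases hs : PySem.List.sorted (PySem.Set.ofList (x :: xs)) (fun x => x) false with
    | nil => simp [PySem.List.enumerate_nil, pvGroups]
    | cons s0 rest =>
      refine Eq.trans ((pvAFold_eq_foldl rest s0 s0 []).symm) ?_
      exact Eq.trans (pvAFold_eq_model rest s0 s0)
        (pvGroups_eq_model rest.length rest le_rfl 0 s0).symm
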